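-- pv_equiv track=rewrite | github.com/doronrpa-hub/rpa-port-platform | functions/lib/consultation_handler.py | _format_hs
-- ===== SOURCE A (Python) =====
-- def _format_hs(hs_code):
--     """Format HS code to Israeli display format XX.XX.XXXXXX/X (with Luhn check digit)."""
--     raw = str(hs_code)
--     # If already has check digit after slash, preserve it
--     check = ""
--     if "/" in raw:
--         raw, check = raw.split("/", 1)
--     clean = raw.replace(".", "").replace(" ", "")
--     clean = clean.ljust(10, "0")[:10]
--     if not check and len(clean) == 10 and clean.isdigit():
--         # Compute Luhn check digit
--         total = 0
--         for i, ch in enumerate(reversed(clean)):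
--             d = int(ch)
--             if i % 2 == 0:
--                 d *= 2
--                 if d > 9:
--                     d -= 9
--             total += d
--         check = str((10 - total % 10) % 10)
--     if len(clean) >= 10:
--         return f"{clean[:2]}.{clean[2:4]}.{clean[4:10]}/{check}"
--     elif len(clean) >= 4:
--         return f"{clean[:2]}.{clean[2:4]}.{clean[4:]}"
--     return clean
-- ===== SOURCE B (Python) =====
-- _DOUBLE = (0, 2, 4, 6, 8, 1, 3, 5, 7, 9)
--
--
-- def _luhn_valid(s):
--     """Standard Luhn validation: double every second digit from the right (table-driven,
--     left-to-right with a toggle)."""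
--     total = 0
--     double = len(s) % 2 == 0
--     for ch in s:
--         total += _DOUBLE[int(ch)] if double else int(ch)
--         double = not double
--     return total % 10 == 0
--
--
-- def _format_hs(hs_code):
--     """Format HS code to Israeli display format XX.XX.XXXXXX/X (with Luhn check digit)."""
--     raw = str(hs_code)
--     check = ""
--     if "/" in raw:
--         raw, check = raw.split("/", 1)
--     clean = (raw.replace(".", "").replace(" ", "") + "0" * 10)[:10]
--     if not check and clean.isdigit():
--         # check digit = the unique digit whose appended code passes Luhn validation
--         for d in "0123456789":
--             if _luhn_valid(clean + d):
--                 check = d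
--                 break
--     return f"{clean[:2]}.{clean[2:4]}.{clean[4:10]}/{check}"
-- ===== Notes on version B (the rewrite author's own statement) =====
-- stated objective: alternative
-- what changed: Instead of computing the Luhn check digit in closed form with one reversed parity-branching loop, B tries the ten candidate digits and keeps the first whose appended code passes a table-driven, left-to-right Luhn validator with a toggle flag; padding is done by concatenation and the two unreachable short-length return branches are dropped.
import Mathlib
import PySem

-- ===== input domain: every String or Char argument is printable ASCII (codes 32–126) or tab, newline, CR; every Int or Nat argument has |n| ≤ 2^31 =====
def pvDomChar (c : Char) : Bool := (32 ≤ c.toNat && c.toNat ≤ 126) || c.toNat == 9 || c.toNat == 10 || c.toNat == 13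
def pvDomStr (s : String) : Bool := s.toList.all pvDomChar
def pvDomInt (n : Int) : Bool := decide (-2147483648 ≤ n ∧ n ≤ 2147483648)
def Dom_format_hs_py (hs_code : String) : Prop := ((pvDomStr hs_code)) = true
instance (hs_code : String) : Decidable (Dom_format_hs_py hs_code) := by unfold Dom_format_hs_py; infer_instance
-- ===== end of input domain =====

-- B replaces the closed-form Luhn computation (one reversed parity-branching loop) by a search:
-- it keeps the first of the ten candidate digits whose appended code passes a table-driven
-- left-to-right Luhn validator; objective: alternative, same cost.

-- ===== PORT A =====
-- int(ch) for a single char; exact for ASCII digits (only called under the isdigit guard)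
def pvDigitA (c : Char) : Int := (c.toNat : Int) - 48

-- raw.split("/", 1) when "/" in raw, else (raw, "") — A's slash handling
def pvSplitSlashA (raw0 : List Char) : List Char × List Char :=
  if PySem.Chars.isIn ['/'] raw0 then
    (match PySem.Chars.splitMax? raw0 ['/'] 1 with
     | some (r :: c :: _) => (r, c)
     | _ => (raw0, []))      -- unreachable: '/' is in raw0 and sep ≠ ""
  else (raw0, [])

def pvLuhnStep (acc : Int) (p : Int × Char) : Int :=
  let d := pvDigitA p.2
  let d := if p.1 % 2 == 0 then (let d2 := d * 2; if d2 > 9 then d2 - 9 else d2) else d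
  acc + d

def format_hs_py (hs_code : String) : String :=
  let rc := pvSplitSlashA hs_code.toList
  let clean0 := PySem.Chars.replace (PySem.Chars.replace rc.1 ['.'] []) [' '] []
  -- ljust(10, "0")[:10], ported by hand (exact): pad with '0' to length 10, then take 10
  let clean := (clean0 ++ List.replicate (10 - clean0.length) '0').take 10
  let check :=
    if rc.2 = [] ∧ clean.length = 10 ∧ PySem.Chars.strIsdigit clean then
      let total := (PySem.List.enumerate clean.reverse).foldl pvLuhnStep 0
      PySem.Int.toChars (PySem.Int.mod (10 - PySem.Int.mod total 10) 10)
    else rc.2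
  if clean.length ≥ 10 then
    String.ofList (PySem.List.slice clean none (some 2) ++ '.' :: PySem.List.slice clean (some 2) (some 4) ++ '.' :: PySem.List.slice clean (some 4) (some 10) ++ '/' :: check)
  else if clean.length ≥ 4 then
    String.ofList (PySem.List.slice clean none (some 2) ++ '.' :: PySem.List.slice clean (some 2) (some 4) ++ '.' :: PySem.List.slice clean (some 4) none)
  else
    String.ofList clean

-- ===== PORT B =====
-- int(c) for a single char; exact for ASCII digits (only reached under the isdigit guard)
def pvDigit (c : Char) : Int := (c.toNat : Int) - 48

-- _DOUBLE = (0, 2, 4, 6, 8, 1, 3, 5, 7, 9)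
def pvDoubleTable : List Int := [0, 2, 4, 6, 8, 1, 3, 5, 7, 9]

-- _DOUBLE[int(ch)]; getD 0 only for totality (Python would raise IndexError there;
-- every ch that reaches the table is an ASCII digit, so the lookup always hits)
def pvDoubleAt (ch : Char) : Int := (PySem.List.pyGet? pvDoubleTable (pvDigit ch)).getD 0

-- _luhn_valid: left-to-right fold carrying (total, double-toggle)
def pvLuhnValid (s : List Char) : Bool :=
  let st := s.foldl
    (fun (st : Int × Bool) ch =>
      (st.1 + (if st.2 then pvDoubleAt ch else pvDigit ch), !st.2))
    (0, PySem.Int.mod (s.length : Int) 2 == 0)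
  PySem.Int.mod st.1 10 == 0

-- the 'for d in "0123456789": if _luhn_valid(clean + d): … break' loop
def pvFindCheck (clean : List Char) : List Char → Option Char
  | [] => none
  | d :: rest => if pvLuhnValid (clean ++ [d]) then some d else pvFindCheck clean rest

-- raw.split("/", 1) when "/" in raw, else (raw, "") — B's slash handling (same glue as A)
def pvSplitSlashB (raw0 : List Char) : List Char × List Char :=
  if PySem.Chars.isIn ['/'] raw0 then
    (match PySem.Chars.splitMax? raw0 ['/'] 1 with
     | some (r :: c :: _) => (r, c)
     | _ => (raw0, []))      -- unreachable: '/' is in raw0 and sep ≠ ""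
  else (raw0, [])

def format_hs_py_alt (hs_code : String) : String :=
  let rc := pvSplitSlashB hs_code.toList
  -- (raw + "0"*10)[:10] : pad by concatenation, then take 10
  let clean := (PySem.Chars.replace (PySem.Chars.replace rc.1 ['.'] []) [' '] [] ++ List.replicate 10 '0').take 10
  let check :=
    if rc.2 = [] ∧ PySem.Chars.strIsdigit clean then
      match pvFindCheck clean ['0','1','2','3','4','5','6','7','8','9'] with
      | some d => [d]
      | none => rc.2          -- loop falls through: check keeps its value ""
    else rc.2
  String.ofList (PySem.List.slice clean none (some 2) ++ '.' :: PySem.List.slice clean (some 2) (some 4) ++ '.' :: PySem.List.slice clean (some 4) (some 10) ++ '/' :: check)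

-- ===== PRECONDITION & SPEC =====
def Spec_format_hs_py (hs_code : String) (out : String) : Prop := out = format_hs_py_alt hs_code
instance (hs_code : String) (out : String) : Decidable (Spec_format_hs_py hs_code out) := by unfold Spec_format_hs_py; infer_instance

-- ===== CLAIM =====
def Claim_equal_format_hs_py : Prop := ∀ (hs_code : String), Dom_format_hs_py hs_code → Spec_format_hs_py hs_code (format_hs_py hs_code)

-- ===== LEMMAS AND PROOFS =====

-- padding: ljust(10,'0')[:10] = (s + '0'*10)[:10]
theorem pv_pad_eq (l : List Char) :
    (l ++ List.replicate (10 - l.length) '0').take 10 = (l ++ List.replicate 10 '0').take 10 := by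
  rw [List.take_append, List.take_append, List.take_replicate, List.take_replicate, min_self,
    min_eq_left (by omega : 10 - l.length ≤ 10)]

theorem pv_len_clean (l : List Char) :
    ((l ++ List.replicate 10 '0').take 10).length = 10 := by
  simp

theorem pv_digit_bounds (a : Char) (h : PySem.Chars.isdigit a = true) :
    0 ≤ pvDigit a ∧ pvDigit a ≤ 9 := by
  simp [PySem.Chars.isdigit, Char.le_def, UInt32.le_iff_toNat_le] at h
  have e : a.toNat = a.val.toNat := rfl
  unfold pvDigit
  omega

-- A's doubling arithmetic coincides with B's table for a digit value
theorem pv_table (d : Int) (h0 : 0 ≤ d) (h9 : d ≤ 9) :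
    (if d * 2 > 9 then d * 2 - 9 else d * 2) = (PySem.List.pyGet? pvDoubleTable d).getD 0 := by
  interval_cases d <;> decide

theorem pv_dbl (a : Char) (h : PySem.Chars.isdigit a = true) :
    (if pvDigit a * 2 > 9 then pvDigit a * 2 - 9 else pvDigit a * 2) = pvDoubleAt a :=
  pv_table (pvDigit a) (pv_digit_bounds a h).1 (pv_digit_bounds a h).2

theorem pvSplit_eq (r : List Char) : pvSplitSlashB r = pvSplitSlashA r := rfl

-- the crux: on a 10-digit string, A's closed-form check digit is exactly the digit
-- B's candidate search finds
set_option maxHeartbeats 1600000 in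
theorem pv_check_eq (c : List Char) (h : c.length = 10) (hd : PySem.Chars.strIsdigit c = true) :
    PySem.Int.toChars (PySem.Int.mod (10 - PySem.Int.mod ((PySem.List.enumerate c.reverse).foldl pvLuhnStep 0) 10) 10)
      = (match pvFindCheck c ['0','1','2','3','4','5','6','7','8','9'] with
         | some d => [d]
         | none => ([] : List Char)) := by
  match c, h with
  | [a0,a1,a2,a3,a4,a5,a6,a7,a8,a9], _ =>
    simp only [PySem.Chars.strIsdigit, List.isEmpty, List.all, Bool.and_eq_true] at hd
    have henum : PySem.List.enumerate ([a0,a1,a2,a3,a4,a5,a6,a7,a8,a9].reverse)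
        = [(0,a9),(1,a8),(2,a7),(3,a6),(4,a5),(5,a4),(6,a3),(7,a2),(8,a1),(9,a0)] := rfl
    rw [henum]
    simp only [List.foldl, pvLuhnStep]
    norm_num
    obtain ⟨-, hd0, hd1, hd2, hd3, hd4, hd5, hd6, hd7, hd8, hd9, -⟩ := hd
    have pv_ab : ∀ x, pvDigitA x = pvDigit x := fun _ => rfl
    simp only [pv_ab]
    rw [pv_dbl a9 hd9, pv_dbl a7 hd7, pv_dbl a5 hd5, pv_dbl a3 hd3, pv_dbl a1 hd1]
    simp only [pvFindCheck, List.cons_append, List.nil_append, pvLuhnValid, List.foldl,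
      List.length_cons, List.length_nil]
    norm_num
    simp only [show pvDigit '0' = 0 from rfl, show pvDigit '1' = 1 from rfl,
      show pvDigit '2' = 2 from rfl, show pvDigit '3' = 3 from rfl, show pvDigit '4' = 4 from rfl,
      show pvDigit '5' = 5 from rfl, show pvDigit '6' = 6 from rfl, show pvDigit '7' = 7 from rfl,
      show pvDigit '8' = 8 from rfl, show pvDigit '9' = 9 from rfl]
    split_ifs with g0 g1 g2 g3 g4 g5 g6 g7 g8 g9
    · have hv : -((pvDoubleAt a9 + pvDigit a8 + pvDoubleAt a7 + pvDigit a6 + pvDoubleAt a5 + pvDigit a4 + pvDoubleAt a3 + pvDigit a2 + pvDoubleAt a1 + pvDigit a0) % 10) % 10 = (0 : Int) := by omega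
      rw [hv]; rfl
    · have hv : -((pvDoubleAt a9 + pvDigit a8 + pvDoubleAt a7 + pvDigit a6 + pvDoubleAt a5 + pvDigit a4 + pvDoubleAt a3 + pvDigit a2 + pvDoubleAt a1 + pvDigit a0) % 10) % 10 = (1 : Int) := by omega
      rw [hv]; rfl
    · have hv : -((pvDoubleAt a9 + pvDigit a8 + pvDoubleAt a7 + pvDigit a6 + pvDoubleAt a5 + pvDigit a4 + pvDoubleAt a3 + pvDigit a2 + pvDoubleAt a1 + pvDigit a0) % 10) % 10 = (2 : Int) := by omega
      rw [hv]; rfl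
    · have hv : -((pvDoubleAt a9 + pvDigit a8 + pvDoubleAt a7 + pvDigit a6 + pvDoubleAt a5 + pvDigit a4 + pvDoubleAt a3 + pvDigit a2 + pvDoubleAt a1 + pvDigit a0) % 10) % 10 = (3 : Int) := by omega
      rw [hv]; rfl
    · have hv : -((pvDoubleAt a9 + pvDigit a8 + pvDoubleAt a7 + pvDigit a6 + pvDoubleAt a5 + pvDigit a4 + pvDoubleAt a3 + pvDigit a2 + pvDoubleAt a1 + pvDigit a0) % 10) % 10 = (4 : Int) := by omega
      rw [hv]; rfl
    · have hv : -((pvDoubleAt a9 + pvDigit a8 + pvDoubleAt a7 + pvDigit a6 + pvDoubleAt a5 + pvDigit a4 + pvDoubleAt a3 + pvDigit a2 + pvDoubleAt a1 + pvDigit a0) % 10) % 10 = (5 : Int) := by omega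
      rw [hv]; rfl
    · have hv : -((pvDoubleAt a9 + pvDigit a8 + pvDoubleAt a7 + pvDigit a6 + pvDoubleAt a5 + pvDigit a4 + pvDoubleAt a3 + pvDigit a2 + pvDoubleAt a1 + pvDigit a0) % 10) % 10 = (6 : Int) := by omega
      rw [hv]; rfl
    · have hv : -((pvDoubleAt a9 + pvDigit a8 + pvDoubleAt a7 + pvDigit a6 + pvDoubleAt a5 + pvDigit a4 + pvDoubleAt a3 + pvDigit a2 + pvDoubleAt a1 + pvDigit a0) % 10) % 10 = (7 : Int) := by omega
      rw [hv]; rfl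
    · have hv : -((pvDoubleAt a9 + pvDigit a8 + pvDoubleAt a7 + pvDigit a6 + pvDoubleAt a5 + pvDigit a4 + pvDoubleAt a3 + pvDigit a2 + pvDoubleAt a1 + pvDigit a0) % 10) % 10 = (8 : Int) := by omega
      rw [hv]; rfl
    · have hv : -((pvDoubleAt a9 + pvDigit a8 + pvDoubleAt a7 + pvDigit a6 + pvDoubleAt a5 + pvDigit a4 + pvDoubleAt a3 + pvDigit a2 + pvDoubleAt a1 + pvDigit a0) % 10) % 10 = (9 : Int) := by omega
      rw [hv]; rfl
    · exfalso; omega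

set_option maxHeartbeats 1600000 in
theorem format_hs_py_spec : Claim_equal_format_hs_py := by
  intro s _
  unfold Spec_format_hs_py format_hs_py format_hs_py_alt
  simp only []
  rw [pvSplit_eq]
  set rc := pvSplitSlashA s.toList with hrc
  set clean0 := PySem.Chars.replace (PySem.Chars.replace rc.1 ['.'] []) [' '] [] with hclean0
  rw [pv_pad_eq]
  set clean := (clean0 ++ List.replicate 10 '0').take 10 with hclean
  have hlen : clean.length = 10 := pv_len_clean clean0
  rw [if_pos (by omega : clean.length ≥ 10)]
  congr 2
  by_cases hck : rc.2 = [] ∧ PySem.Chars.strIsdigit clean = true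
  · rw [if_pos ⟨hck.1, hlen, hck.2⟩, if_pos hck, hck.1]
    exact congrArg ('/' :: ·) (pv_check_eq clean hlen hck.2)
  · rw [if_neg (by tauto), if_neg hck]
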